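-- pv_equiv track=rewrite | github.com/stineje/CharLib | characterizer/LogicParser.py | _resolve_unates
-- ===== SOURCE A (Python) =====
-- def _resolve_unates(syntax_tree: list, target: str):
--     op = syntax_tree.pop(0)
--     if op == '~':
--         unate_l = -1
--         unate_r = None
--     elif op == '&':
--         unate_l = 1
--         unate_r = 1
--     elif op == '|' or op == '^':
--         # can't determine these yet - have to check which side contains the target
--         unate_l = 0
--         unate_r = 0
--     else:
--         return syntax_tree, {op: 1} # Return symbol
--     # Resolve left side
--     syntax_tree, unates = _resolve_unates(syntax_tree, target)
--     # Check for target in left side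
--     if unate_l == 0 and target in unates:
--         unate_l = 1
--     else:
--         unate_l = -1
--     for k,u in unates.items():
--         unates[k] = unate_l * u
--     # Resolve right side
--     if unate_r is not None:
--         syntax_tree, unates_r = _resolve_unates(syntax_tree, target)
--         # Check for target in right side
--         if unate_r == 0 and target in unates_r:
--             unate_r = 1
--         else:
--             unate_r = -1
--         for k,u in unates_r.items():
--             unates[k] = unate_r * u
--     return syntax_tree, unates
-- ===== SOURCE B (Python) =====
-- def _resolve_unates(syntax_tree: list, target: str):
--     # Two phases: (1) one recursive-descent parse over indices building an
--     # annotated AST that records, per subtree, whether it contains the target;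
--     # (2) one top-down walk carrying the cumulative sign to each leaf.
--     # Mutates syntax_tree like the original (removes the consumed prefix).
--     def parse(i):
--         tok = syntax_tree[i]
--         if tok == '~':
--             c, j = parse(i + 1)
--             return ('~', c, c[-1]), j
--         if tok == '&' or tok == '|' or tok == '^':
--             l, j = parse(i + 1)
--             r, j = parse(j)
--             return (tok, l, r, l[-1] or r[-1]), j
--         return ('sym', tok, tok == target), i + 1
--
--     node, end = parse(0)
--     unates = {}
--
--     def walk(node, sign):
--         if node[0] == 'sym':
--             unates[node[1]] = sign
--         elif node[0] == '~':
--             walk(node[1], -sign)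
--         elif node[0] == '&':
--             walk(node[1], -sign)
--             walk(node[2], -sign)
--         else:  # '|' or '^': sign of a side is + iff that side contains the target
--             walk(node[1], sign if node[1][-1] else -sign)
--             walk(node[2], sign if node[2][-1] else -sign)
--
--     walk(node, 1)
--     del syntax_tree[:end]
--     return syntax_tree, unates
-- ===== Notes on version B (the rewrite author's own statement) =====
-- stated objective: alternative
-- what changed: A rescales the whole accumulated dict at every operator node and pops tokens from the front of the list; B parses once into an AST annotated with per-subtree target-containment, then a single top-down walk carries the cumulative sign to each leaf.
import Mathlib
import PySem

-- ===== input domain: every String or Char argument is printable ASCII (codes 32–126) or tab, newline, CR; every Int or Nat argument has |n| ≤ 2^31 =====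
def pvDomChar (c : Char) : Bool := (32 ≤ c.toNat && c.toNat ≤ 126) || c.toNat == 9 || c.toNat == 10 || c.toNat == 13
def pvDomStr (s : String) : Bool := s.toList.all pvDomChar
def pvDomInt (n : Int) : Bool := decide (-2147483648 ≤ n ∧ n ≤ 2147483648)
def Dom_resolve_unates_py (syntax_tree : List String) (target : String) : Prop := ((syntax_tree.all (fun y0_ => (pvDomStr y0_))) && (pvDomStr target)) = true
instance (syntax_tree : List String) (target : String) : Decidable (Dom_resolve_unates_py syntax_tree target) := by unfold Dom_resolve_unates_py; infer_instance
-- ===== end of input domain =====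

-- B replaces A's per-node rescaling of the whole accumulated dict (and its front pops) by one
-- parse into an AST annotated with per-subtree target-containment plus one top-down walk that
-- carries the cumulative sign to each leaf (alternative decomposition). Both Pythons mutate
-- syntax_tree identically (consumed prefix removed); the equivalence proved is about the return value.

-- ===== PORT A =====
-- `for k,u in unates.items(): unates[k] = s*u` rewrites every value in place (keys and order unchanged)
def goAMul (d : PySem.Dict String Int) (s : Int) : PySem.Dict String Int :=
  PySem.Dict.mk (d.items.map (fun kv => (kv.1, s * kv.2)))

-- A's recursion, with fuel only to make it total: A pops at least one token per call, so
-- `length + 1` fuel never runs out on an input where the Python returns (Pre_ below).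
def goA (target : String) : Nat → List String → List String × PySem.Dict String Int
  | 0, _ => ([], PySem.Dict.mk [])            -- fuel guard (unreachable under Pre_)
  | _ + 1, [] => ([], PySem.Dict.mk [])       -- Python: IndexError on pop; excluded by Pre_
  | fuel + 1, op :: rest =>
    match (if op == "~" then some ((-1 : Int), (none : Option Int))
           else if op == "&" then some (1, some 1)
           else if op == "|" || op == "^" then some (0, some 0)
           else none) with
    | none => (rest, PySem.Dict.mk [(op, 1)])   -- return symbol
    | some (ul0, ur0) =>
      -- resolve left side
      let pL := goA target fuel rest
      let ul : Int := if ul0 == 0 && pL.2.contains target then 1 else -1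
      let u1 := goAMul pL.2 ul
      match ur0 with
      | none => (pL.1, u1)
      | some ur1 =>
        -- resolve right side
        let pR := goA target fuel pL.1
        let ur : Int := if ur1 == 0 && pR.2.contains target then 1 else -1
        (pR.1, pR.2.items.foldl (fun d kv => d.insert kv.1 (ur * kv.2)) u1)

def resolve_unates_py (syntax_tree : List String) (target : String) : List String × (List (String × Int)) :=
  let p := goA target (syntax_tree.length + 1) syntax_tree
  (p.1, p.2.items)

-- ===== PORT B =====
-- B's AST node: leaf / '~' / binary, last component = "subtree contains target"
inductive BNode where
  | sym : String → Bool → BNode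
  | neg : BNode → Bool → BNode
  | bin : String → BNode → BNode → Bool → BNode
deriving Repr, DecidableEq

def BNode.cont : BNode → Bool
  | .sym _ c => c
  | .neg _ c => c
  | .bin _ _ _ c => c

-- B's index-based recursive-descent parse; fuel only for totality (indices strictly grow,
-- `length + 1` suffices); `none` is exactly Python's IndexError, excluded by Pre_.
def parseB (tree : List String) (target : String) : Nat → Nat → Option (BNode × Nat)
  | 0, _ => none
  | fuel + 1, i =>
    match tree[i]? with
    | none => none
    | some tok =>
      if tok == "~" then
        match parseB tree target fuel (i + 1) with
        | some (c, j) => some (.neg c c.cont, j)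
        | none => none
      else if tok == "&" || tok == "|" || tok == "^" then
        match parseB tree target fuel (i + 1) with
        | some (l, j) =>
          match parseB tree target fuel j with
          | some (r, k) => some (.bin tok l r (l.cont || r.cont), k)
          | none => none
        | none => none
      else some (.sym tok (tok == target), i + 1)

-- B's top-down walk: cumulative sign down to each leaf, writing into one dict
def walkB : BNode → Int → PySem.Dict String Int → PySem.Dict String Int
  | .sym s _, sign, d => d.insert s sign
  | .neg c _, sign, d => walkB c (-sign) d
  | .bin op l r _, sign, d =>
    if op == "&" then walkB r (-sign) (walkB l (-sign) d)
    else walkB r (if r.cont then sign else -sign)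
           (walkB l (if l.cont then sign else -sign) d)

def resolve_unates_py_alt (syntax_tree : List String) (target : String) : List String × (List (String × Int)) :=
  match parseB syntax_tree target (syntax_tree.length + 1) 0 with
  | some (node, e) => (syntax_tree.drop e, (walkB node 1 (PySem.Dict.mk [])).items)
  | none => (syntax_tree, [])   -- Python: IndexError; excluded by Pre_

-- ===== PRECONDITION & SPEC =====
-- tokens consumed per operator: '~' one operand, '&','|','^' two, anything else is a leaf
def pvArity (tok : String) : Nat :=
  if tok == "~" then 1 else if tok == "&" || tok == "|" || tok == "^" then 2 else 0

-- arity-balance scan: `consume toks n` = the rest after reading n complete prefix formulas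
def pvConsume : List String → Nat → Option (List String)
  | toks, 0 => some toks
  | [], _ + 1 => none
  | t :: ts, n + 1 => pvConsume ts (n + pvArity t)

-- A raises IndexError (pop from empty) exactly when the list does not start with one complete
-- prefix-notation formula; Pre_ is the standard arity-balance criterion for that.
def Pre_resolve_unates_py (syntax_tree : List String) (target : String) : Prop :=
  (pvConsume syntax_tree 1).isSome = true
instance (syntax_tree : List String) (target : String) : Decidable (Pre_resolve_unates_py syntax_tree target) := by
  unfold Pre_resolve_unates_py; infer_instance

def pvWitness_resolve_unates_py : List String × String := (["&", "a", "b"], "a")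

def Spec_resolve_unates_py (syntax_tree : List String) (target : String) (out : List String × (List (String × Int))) : Prop := out = resolve_unates_py_alt syntax_tree target
instance (syntax_tree : List String) (target : String) (out : List String × (List (String × Int))) : Decidable (Spec_resolve_unates_py syntax_tree target out) := by unfold Spec_resolve_unates_py; infer_instance

-- ===== CLAIM (what is proved, stated in full; the proofs are below) =====
def Claim_equal_resolve_unates_py : Prop := ∀ (syntax_tree : List String) (target : String), Dom_resolve_unates_py syntax_tree target → Pre_resolve_unates_py syntax_tree target → Spec_resolve_unates_py syntax_tree target (resolve_unates_py syntax_tree target)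

-- ===== LEMMAS AND PROOFS =====

-- merge a list of pairs into a dict, Python `for k,v in l: d[k] = v`
def mergeL (l : List (String × Int)) (d : PySem.Dict String Int) : PySem.Dict String Int :=
  l.foldl (fun d kv => d.insert kv.1 kv.2) d

-- the dict A computes for one subtree (signs relative to the subtree root)
def unA : BNode → PySem.Dict String Int
  | .sym s _ => PySem.Dict.mk [(s, 1)]
  | .neg c _ => goAMul (unA c) (-1)
  | .bin op l r _ =>
    let sl : Int := if op == "&" then -1 else if l.cont then 1 else -1
    let sr : Int := if op == "&" then -1 else if r.cont then 1 else -1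
    mergeL (goAMul (unA r) sr).items (goAMul (unA l) sl)

-- containment flags are correct w.r.t. target
def WFnode (target : String) : BNode → Prop
  | .sym s c => c = (s == target)
  | .neg ch c => c = ch.cont ∧ WFnode target ch
  | .bin _ l r c => c = (l.cont || r.cont) ∧ WFnode target l ∧ WFnode target r

-- list-consuming twin of parseB (proof-side only)
def parseL (target : String) : Nat → List String → Option (BNode × List String)
  | 0, _ => none
  | _ + 1, [] => none
  | fuel + 1, tok :: ts =>
    if tok == "~" then
      match parseL target fuel ts with
      | some (c, r) => some (.neg c c.cont, r)
      | none => none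
    else if tok == "&" || tok == "|" || tok == "^" then
      match parseL target fuel ts with
      | some (l, r1) =>
        match parseL target fuel r1 with
        | some (r, r2) => some (.bin tok l r (l.cont || r.cont), r2)
        | none => none
      | none => none
    else some (.sym tok (tok == target), ts)

lemma map_replace_id (l : List (String × Int)) (k : String) (v : Int)
    (h : ∀ p ∈ l, p.1 ≠ k) :
    l.map (fun p => if p.1 == k then (k, v) else p) = l := by
  induction l with
  | nil => rfl
  | cons p l ih =>
    have hp : (p.1 == k) = false := by simpa using h p (by simp)
    rw [List.map_cons, if_neg (by simp [hp]), ih (fun q hq => h q (by simp [hq]))]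

lemma insert_comm_of_contains (d : PySem.Dict String Int) (k k' : String) (v v' : Int)
    (hc : d.contains k = true) (hne : k' ≠ k) :
    (d.insert k v).insert k' v' = (d.insert k' v').insert k v := by
  apply PySem.Dict.ext
  have hks : (k' == k) = false := by simpa using hne
  have hks' : (k == k') = false := by simpa using (Ne.symm hne)
  by_cases hc' : d.contains k' = true
  · simp only [PySem.Dict.items_insert, PySem.Dict.contains_insert, hc, hc', hks, hks',
      Bool.or_true, if_true, List.map_map]
    apply List.map_congr_left
    intro p _
    by_cases h1 : p.1 = k <;> by_cases h2 : p.1 = k' <;>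
      simp [Function.comp, h1, h2, hks, hks']
  · have hc'2 : d.contains k' = false := by simpa using hc'
    simp only [PySem.Dict.items_insert, PySem.Dict.contains_insert, hc, hc'2, hks, hks',
      Bool.or_false, Bool.or_true, if_true]
    simp
    exact fun hh => absurd hh hne

lemma mergeL_insert_of_mem (l : List (String × Int)) (d : PySem.Dict String Int)
    (k : String) (v : Int) (hk : ∀ p ∈ l, p.1 ≠ k) (hc : d.contains k = true) :
    mergeL l (d.insert k v) = (mergeL l d).insert k v := by
  induction l generalizing d with
  | nil => rfl
  | cons p l ih =>
    have hp : p.1 ≠ k := hk p (by simp)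
    show mergeL l ((d.insert k v).insert p.1 p.2) = (mergeL l (d.insert p.1 p.2)).insert k v
    rw [insert_comm_of_contains d k p.1 v p.2 hc hp]
    exact ih _ (fun q hq => hk q (by simp [hq]))
      (by rw [PySem.Dict.contains_insert]; simp [hc])

lemma merge_set (d e : PySem.Dict String Int) (k : String) (v : Int)
    (hnk : e.keys.Nodup) :
    mergeL (e.insert k v).items d = (mergeL e.items d).insert k v := by
  obtain ⟨l⟩ := e
  induction l generalizing d with
  | nil =>
    have : (PySem.Dict.mk ([] : List (String × Int))).contains k = false := by
      simp [PySem.Dict.contains]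
    simp [mergeL, PySem.Dict.items_insert_of_not_contains _ _ this]
  | cons p l ih =>
    obtain ⟨k0, v0⟩ := p
    have hnk2 : k0 ∉ l.map (fun x => x.1) ∧ (l.map (fun x => x.1)).Nodup := by
      simpa [PySem.Dict.keys] using hnk
    have hnk' : ((PySem.Dict.mk l).keys).Nodup := by
      simpa [PySem.Dict.keys] using hnk2.2
    have hk0 : k0 ∉ l.map (fun x => x.1) := hnk2.1
    by_cases hkk : k0 = k
    · subst hkk
      have hc : (PySem.Dict.mk ((k0, v0) :: l)).contains k0 = true := by
        simp [PySem.Dict.contains]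
      rw [PySem.Dict.items_insert_of_contains _ _ hc]
      have hrepl : ((k0, v0) :: l).map (fun p => if p.1 == k0 then (k0, v) else p)
          = (k0, v) :: l := by
        simp only [List.map_cons, if_pos (by simp : ((k0, v0).1 == k0) = true)]
        rw [map_replace_id l k0 v (fun q hq hq1 => hk0 (by
          simpa [hq1] using (List.mem_map_of_mem hq : q.1 ∈ l.map (fun x => x.1))))]
      rw [hrepl]
      show mergeL l (d.insert k0 v) = (mergeL l (d.insert k0 v0)).insert k0 v
      rw [← PySem.Dict.insert_insert_self d k0 v0 v]
      exact mergeL_insert_of_mem l (d.insert k0 v0) k0 v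
        (fun q hq hq1 => hk0 (by simpa [hq1] using (List.mem_map_of_mem hq : q.1 ∈ l.map (fun x => x.1))))
        (PySem.Dict.contains_insert_self d k0 v0)
    · by_cases hcl : (PySem.Dict.mk l).contains k = true
      · have hc : (PySem.Dict.mk ((k0, v0) :: l)).contains k = true := by
          simp only [PySem.Dict.contains] at hcl ⊢
          simp [hcl]
        rw [PySem.Dict.items_insert_of_contains _ _ hc]
        have hstep : ((k0, v0) :: l).map (fun p => if p.1 == k then (k, v) else p)
            = (k0, v0) :: l.map (fun p => if p.1 == k then (k, v) else p) := by
          simp only [List.map_cons, if_neg (by simpa using hkk : ¬ ((k0, v0).1 == k) = true)]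
        rw [hstep]
        show mergeL (l.map (fun p => if p.1 == k then (k, v) else p)) (d.insert k0 v0)
            = (mergeL l (d.insert k0 v0)).insert k v
        have := ih (d.insert k0 v0) hnk'
        rw [PySem.Dict.items_insert_of_contains _ _ hcl] at this
        exact this
      · have hcl3 : l.any (fun p => p.1 == k) = false := Bool.eq_false_iff.mpr hcl
        have hcl2 : (PySem.Dict.mk ((k0, v0) :: l)).contains k = false := by
          simp [PySem.Dict.contains, List.any_cons, hcl3, (by simpa using hkk : (k0 == k) = false)]
        rw [PySem.Dict.items_insert_of_not_contains _ _ hcl2]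
        show mergeL (((k0, v0) :: l) ++ [(k, v)]) d = (mergeL ((k0, v0) :: l) d).insert k v
        simp [mergeL, List.foldl_append]

lemma mergeL_merge (fs : List (String × Int)) (e d : PySem.Dict String Int)
    (hnk : e.keys.Nodup) :
    mergeL (mergeL fs e).items d = mergeL fs (mergeL e.items d) := by
  induction fs generalizing e with
  | nil => rfl
  | cons p fs ih =>
    obtain ⟨k, v⟩ := p
    show mergeL (mergeL fs (e.insert k v)).items d = mergeL fs ((mergeL e.items d).insert k v)
    rw [ih (e.insert k v) (PySem.Dict.nodup_keys_insert e k v hnk),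
      merge_set d e k v hnk]

lemma contains_goAMul (d : PySem.Dict String Int) (s : Int) (k : String) :
    (goAMul d s).contains k = d.contains k := by
  show List.any (List.map (fun kv => (kv.1, s * kv.2)) d.items) (fun p => p.1 == k)
      = List.any d.items (fun p => p.1 == k)
  rw [List.any_map]
  rfl

lemma keys_goAMul (d : PySem.Dict String Int) (s : Int) :
    (goAMul d s).keys = d.keys := by
  show List.map (fun x => x.1) (List.map (fun kv => (kv.1, s * kv.2)) d.items)
      = List.map (fun x => x.1) d.items
  rw [List.map_map]
  rfl

lemma contains_mergeL (l : List (String × Int)) (d : PySem.Dict String Int) (k : String) :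
    (mergeL l d).contains k = (d.contains k || l.any (fun p => p.1 == k)) := by
  induction l generalizing d with
  | nil => simp [mergeL]
  | cons p l ih =>
    show (mergeL l (d.insert p.1 p.2)).contains k = _
    rw [ih, PySem.Dict.contains_insert]
    have hsym : (p.1 == k) = (k == p.1) := by
      by_cases he : p.1 = k
      · simp [he]
      · simp [he, Ne.symm he]
    rw [List.any_cons, hsym]
    cases (k == p.1) <;> cases d.contains k <;> simp

lemma nk_mergeL (l : List (String × Int)) (d : PySem.Dict String Int)
    (h : d.keys.Nodup) : (mergeL l d).keys.Nodup := by
  induction l generalizing d with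
  | nil => exact h
  | cons p l ih => exact ih _ (PySem.Dict.nodup_keys_insert d p.1 p.2 h)

lemma nk_unA (n : BNode) : (unA n).keys.Nodup := by
  induction n with
  | sym s c => simp [unA, PySem.Dict.keys]
  | neg c ch ih =>
    show (goAMul (unA c) (-1)).keys.Nodup
    rw [keys_goAMul]; exact ih
  | bin op l r c ihl ihr =>
    show (mergeL _ _).keys.Nodup
    apply nk_mergeL
    rw [keys_goAMul]; exact ihl

lemma contains_unA (target : String) (n : BNode) (h : WFnode target n) :
    (unA n).contains target = n.cont := by
  induction n with
  | sym s c =>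
    show (PySem.Dict.mk [(s, 1)]).contains target = c
    simp only [WFnode] at h
    simp [PySem.Dict.contains, h]
  | neg ch cc ih =>
    obtain ⟨h1, h2⟩ := h
    show (goAMul (unA ch) (-1)).contains target = cc
    rw [contains_goAMul, ih h2, h1]
  | bin op l r cc ihl ihr =>
    obtain ⟨h1, hl, hr⟩ := h
    show (mergeL (goAMul (unA r) _).items (goAMul (unA l) _)).contains target = cc
    rw [contains_mergeL, contains_goAMul, ihl hl]
    have : (goAMul (unA r) (if op == "&" then -1 else if r.cont then 1 else -1)).items.any
        (fun p => p.1 == target) = (unA r).contains target := by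
      rw [← PySem.Dict.contains, contains_goAMul]
    rw [this, ihr hr, h1]

lemma goAMul_insert (d : PySem.Dict String Int) (k : String) (v s : Int) :
    goAMul (d.insert k v) s = (goAMul d s).insert k (s * v) := by
  apply PySem.Dict.ext
  by_cases hc : d.contains k = true
  · have hc2 : (goAMul d s).contains k = true := by rw [contains_goAMul]; exact hc
    rw [goAMul, PySem.Dict.items_insert_of_contains _ _ hc,
      PySem.Dict.items_insert_of_contains _ _ hc2]
    simp only [goAMul, List.map_map]
    apply List.map_congr_left
    intro p _
    by_cases h1 : p.1 = k <;> simp [Function.comp, h1]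
  · have hc1 : d.contains k = false := by simpa using hc
    have hc2 : (goAMul d s).contains k = false := by rw [contains_goAMul]; exact hc1
    rw [goAMul, PySem.Dict.items_insert_of_not_contains _ _ hc1,
      PySem.Dict.items_insert_of_not_contains _ _ hc2]
    simp [goAMul]

lemma goAMul_mergeL (l : List (String × Int)) (d : PySem.Dict String Int) (s : Int) :
    goAMul (mergeL l d) s = mergeL (l.map (fun kv => (kv.1, s * kv.2))) (goAMul d s) := by
  induction l generalizing d with
  | nil => rfl
  | cons p l ih =>
    show goAMul (mergeL l (d.insert p.1 p.2)) s = _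
    rw [ih, goAMul_insert]
    rfl

lemma goAMul_goAMul (d : PySem.Dict String Int) (a b : Int) :
    goAMul (goAMul d a) b = goAMul d (b * a) := by
  apply PySem.Dict.ext
  simp only [goAMul, List.map_map]
  apply List.map_congr_left
  intro p _
  simp [Function.comp, mul_assoc]

lemma goAMul_one (d : PySem.Dict String Int) : goAMul d 1 = d := by
  apply PySem.Dict.ext
  simp [goAMul]

-- B's walk = merge in A's subtree dict, rescaled by the cumulative sign
lemma walkB_eq (n : BNode) (s : Int) (d : PySem.Dict String Int) :
    walkB n s d = mergeL (goAMul (unA n) s).items d := by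
  induction n generalizing s d with
  | sym s' c =>
    show d.insert s' s = mergeL (goAMul (PySem.Dict.mk [(s', 1)]) s).items d
    simp [goAMul, mergeL]
  | neg c cc ih =>
    show walkB c (-s) d = mergeL (goAMul (goAMul (unA c) (-1)) s).items d
    rw [goAMul_goAMul, ih]
    norm_num
  | bin op l r cc ihl ihr =>
    have key : ∀ sl sr : Int,
        walkB r (sr * s) (walkB l (sl * s) d)
          = mergeL (goAMul (mergeL (goAMul (unA r) sr).items (goAMul (unA l) sl)) s).items d := by
      intro sl sr
      rw [goAMul_mergeL]
      have hit : ((goAMul (unA r) sr).items.map (fun kv => (kv.1, s * kv.2)))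
          = (goAMul (goAMul (unA r) sr) s).items := rfl
      rw [hit, goAMul_goAMul, goAMul_goAMul,
        mergeL_merge _ _ _ (by rw [keys_goAMul]; exact nk_unA l),
        ihl, ihr, mul_comm s sl, mul_comm s sr]
    by_cases hop : (op == "&") = true
    · show (if op == "&" then walkB r (-s) (walkB l (-s) d) else _) = _
      rw [if_pos hop]
      have := key (-1) (-1)
      norm_num at this
      simpa [unA, hop] using this
    · show (if op == "&" then _ else walkB r (if r.cont then s else -s) (walkB l (if l.cont then s else -s) d)) = _
      rw [if_neg hop]
      have := key (if l.cont then 1 else -1) (if r.cont then 1 else -1)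
      have harg : ∀ b : Bool, ((if b then (1:Int) else -1) * s) = (if b then s else -s) := by
        intro b; cases b <;> simp
      rw [harg, harg] at this
      simpa [unA, hop] using this

lemma parseL_sub (target : String) (fuel : Nat) (toks : List String) (n : BNode)
    (r : List String) (h : parseL target fuel toks = some (n, r)) :
    ∃ pre, toks = pre ++ r ∧ pre ≠ [] := by
  induction fuel generalizing toks n r with
  | zero => simp [parseL] at h
  | succ fuel ih =>
    match toks with
    | [] => simp [parseL] at h
    | tok :: ts =>
      by_cases h1 : (tok == "~") = true
      · simp only [parseL, if_pos h1] at h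
        match hp : parseL target fuel ts with
        | some (c, r') =>
          rw [hp] at h
          simp at h
          obtain ⟨pre, hpre, -⟩ := ih ts c r' hp
          exact ⟨tok :: pre, by simp [hpre, h.2], by simp⟩
        | none => rw [hp] at h; simp at h
      · by_cases h2 : (tok == "&" || tok == "|" || tok == "^") = true
        · simp only [parseL, if_neg h1, if_pos h2] at h
          match hp : parseL target fuel ts with
          | some (l, r1) =>
            rw [hp] at h
            simp only [] at h
            match hq : parseL target fuel r1 with
            | some (rr, r2) =>
              rw [hq] at h
              simp at h
              obtain ⟨p1, hp1, -⟩ := ih ts l r1 hp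
              obtain ⟨p2, hp2, -⟩ := ih r1 rr r2 hq
              exact ⟨tok :: p1 ++ p2, by simp [hp1, hp2, h.2], by simp⟩
            | none => rw [hq] at h; simp at h
          | none => rw [hp] at h; simp at h
        · simp only [parseL, if_neg h1, if_neg h2] at h
          simp at h
          exact ⟨[tok], by simp [h.2], by simp⟩

-- the right-side merge loop of A is a merge of the rescaled right dict
lemma foldl_scale (X : PySem.Dict String Int) (s : Int) (d : PySem.Dict String Int) :
    X.items.foldl (fun d kv => d.insert kv.1 (s * kv.2)) d = mergeL (goAMul X s).items d := by
  simp [mergeL, goAMul, List.foldl_map]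

-- A computes exactly (rest, unA node) on a parseable prefix
lemma goA_eq (target : String) (fuel : Nat) (toks : List String) (n : BNode)
    (r : List String) (h : parseL target fuel toks = some (n, r)) :
    WFnode target n ∧ goA target fuel toks = (r, unA n) := by
  induction fuel generalizing toks n r with
  | zero => simp [parseL] at h
  | succ fuel ih =>
    match toks with
    | [] => simp [parseL] at h
    | tok :: ts =>
      by_cases h1 : (tok == "~") = true
      · simp only [parseL, if_pos h1] at h
        match hp : parseL target fuel ts with
        | some (c, r') =>
          rw [hp] at h
          simp at h
          obtain ⟨hwf, hgo⟩ := ih ts c r' hp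
          refine ⟨by simp [← h.1, WFnode, hwf], ?_⟩
          simp only [goA, if_pos h1, hgo]
          simp [← h.1, ← h.2, unA]
        | none => rw [hp] at h; simp at h
      · by_cases h2 : (tok == "&" || tok == "|" || tok == "^") = true
        · simp only [parseL, if_neg h1, if_pos h2] at h
          match hp : parseL target fuel ts with
          | some (l, r1) =>
            rw [hp] at h
            simp only [] at h
            match hq : parseL target fuel r1 with
            | some (rr, r2) =>
              rw [hq] at h
              simp at h
              obtain ⟨hwfl, hgol⟩ := ih ts l r1 hp
              obtain ⟨hwfr, hgor⟩ := ih r1 rr r2 hq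
              refine ⟨by simp [← h.1, WFnode, hwfl, hwfr], ?_⟩
              by_cases hA : (tok == "&") = true
              · simp [goA, h1, hA, hgol, hgor, ← h.1, ← h.2, unA]
                rw [← foldl_scale]
                exact List.foldl_ext _ _ _ (fun d kv _ => by simp)
              · have hO : (tok == "|" || tok == "^") = true := by
                  cases hx : (tok == "|") <;> cases hy : (tok == "^") <;> simp_all
                simp [goA, h1, hA, hO, hgol, hgor, ← h.1, ← h.2, unA,
                  contains_unA target l hwfl, contains_unA target rr hwfr]
                rw [← foldl_scale]
                exact List.foldl_ext _ _ _ (fun d kv _ => by cases hcr : rr.cont <;> simp)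
            | none => rw [hq] at h; simp at h
          | none => rw [hp] at h; simp at h
        · simp only [parseL, if_neg h1, if_neg h2] at h
          simp at h
          have hA : (tok == "&") = false := by
            cases hx : (tok == "&")
            · rfl
            · exact absurd (by simp [hx]) h2
          have hO : (tok == "|" || tok == "^") = false := by
            cases hx : (tok == "|" || tok == "^")
            · rfl
            · exact absurd (by
                rcases (by simpa using hx : tok = "|" ∨ tok = "^") with h3 | h3 <;>
                  simp [h3]) h2
          refine ⟨by simp [← h.1, WFnode], ?_⟩
          simp [goA, h1, hA, hO, ← h.1, ← h.2, unA]

lemma parseB_of_parseL (tree : List String) (target : String) (fuel : Nat) :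
    ∀ i n r, parseL target fuel (tree.drop i) = some (n, r) →
      ∃ j, parseB tree target fuel i = some (n, j) ∧ tree.drop j = r := by
  induction fuel with
  | zero => intro i n r h; simp [parseL] at h
  | succ fuel ih =>
    intro i n r h
    match e : tree.drop i with
    | [] => rw [e] at h; simp [parseL] at h
    | tok :: ts =>
      rw [e] at h
      have hget : tree[i]? = some tok := by
        have h0 : (tree.drop i)[0]? = tree[i + 0]? := List.getElem?_drop
        rw [e] at h0; simpa using h0.symm
      have hts : tree.drop (i + 1) = ts := by
        have h1 : List.drop 1 (List.drop i tree) = List.drop (i + 1) tree := List.drop_drop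
        rw [e] at h1; simpa using h1.symm
      by_cases h1 : (tok == "~") = true
      · simp only [parseL, if_pos h1] at h
        match hp : parseL target fuel ts with
        | some (c, r') =>
          rw [hp] at h; simp at h
          obtain ⟨j, hj, hdj⟩ := ih (i + 1) c r' (by rw [hts]; exact hp)
          refine ⟨j, ?_, by rw [hdj, h.2]⟩
          simp only [parseB, hget, if_pos h1, hj, h.1]
        | none => rw [hp] at h; simp at h
      · by_cases h2 : (tok == "&" || tok == "|" || tok == "^") = true
        · simp only [parseL, if_neg h1, if_pos h2] at h
          match hp : parseL target fuel ts with
          | some (l, r1) =>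
            rw [hp] at h
            simp only [] at h
            match hq : parseL target fuel r1 with
            | some (rr, r2) =>
              rw [hq] at h; simp at h
              obtain ⟨j1, hj1, hdj1⟩ := ih (i + 1) l r1 (by rw [hts]; exact hp)
              obtain ⟨j2, hj2, hdj2⟩ := ih j1 rr r2 (by rw [hdj1]; exact hq)
              refine ⟨j2, ?_, by rw [hdj2, h.2]⟩
              simp only [parseB, hget, if_neg h1, if_pos h2, hj1, hj2, h.1]
            | none => rw [hq] at h; simp at h
          | none => rw [hp] at h; simp at h
        · simp only [parseL, if_neg h1, if_neg h2] at h
          simp at h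
          refine ⟨i + 1, ?_, by rw [hts, h.2]⟩
          simp only [parseB, hget, if_neg h1, if_neg h2, h.1]

lemma consume_parseL (target : String) (fuel : Nat) :
    ∀ toks m rest, toks.length < fuel → pvConsume toks (m + 1) = some rest →
      ∃ node r1, parseL target fuel toks = some (node, r1) ∧ pvConsume r1 m = some rest := by
  induction fuel with
  | zero => intro toks m rest hlen; omega
  | succ fuel ih =>
    intro toks m rest hlen hc
    match toks with
    | [] => simp [pvConsume] at hc
    | t :: ts =>
      by_cases h1 : (t == "~") = true
      · have hc' : pvConsume ts (m + 1) = some rest := by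
          simpa [pvConsume, pvArity, h1] using hc
        obtain ⟨c, r1, hp, hr⟩ := ih ts m rest (by simp at hlen; omega) hc'
        exact ⟨.neg c c.cont, r1, by simp [parseL, h1, hp], hr⟩
      · by_cases h2 : (t == "&" || t == "|" || t == "^") = true
        · have hc' : pvConsume ts (m + 2) = some rest := by
            have ha2 : pvArity t = 2 := by simp [pvArity, h1, h2]
            have : pvConsume (t :: ts) (m + 1) = pvConsume ts (m + 1 - 1 + pvArity t) := rfl
            simpa [pvConsume, ha2] using hc
          obtain ⟨l, r1, hp, hr⟩ := ih ts (m + 1) rest (by simp at hlen; omega) hc'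
          obtain ⟨pre, hpre, hpne⟩ := parseL_sub target fuel ts l r1 hp
          have hr1len : r1.length < fuel := by
            have hll := congrArg List.length hpre
            simp at hll hlen
            cases pre with
            | nil => exact absurd rfl hpne
            | cons a b => simp at hll; omega
          obtain ⟨rr, r2, hq, hr2⟩ := ih r1 m rest hr1len hr
          exact ⟨.bin t l rr (l.cont || rr.cont), r2, by simp [parseL, h1, h2, hp, hq], hr2⟩
        · have ha : pvArity t = 0 := by simp [pvArity, h1, h2]
          have hc' : pvConsume ts m = some rest := by simpa [pvConsume, ha] using hc
          exact ⟨.sym t (t == target), ts, by simp [parseL, h1, h2], hc'⟩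

lemma mergeL_fresh (l : List (String × Int)) (d : PySem.Dict String Int)
    (hnk : (l.map Prod.fst).Nodup) (hf : ∀ p ∈ l, d.contains p.1 = false) :
    mergeL l d = PySem.Dict.mk (d.items ++ l) := by
  induction l generalizing d with
  | nil => simp [mergeL]
  | cons p l ih =>
    have hnk2 : p.1 ∉ l.map Prod.fst ∧ (l.map Prod.fst).Nodup := by
      simpa using hnk
    have hc : d.contains p.1 = false := hf p (by simp)
    show mergeL l (d.insert p.1 p.2) = _
    have hins : d.insert p.1 p.2 = PySem.Dict.mk (d.items ++ [p]) := by
      apply PySem.Dict.ext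
      rw [PySem.Dict.items_insert_of_not_contains _ _ hc]
    rw [hins, ih _ hnk2.2 ?_]
    · simp
    · intro q hq
      simp only [PySem.Dict.contains, List.any_append, Bool.or_eq_false_iff]
      refine ⟨by simpa [PySem.Dict.contains] using hf q (by simp [hq]), ?_⟩
      simp only [List.any_cons, List.any_nil, Bool.or_false]
      have hqm : q.1 ∈ l.map Prod.fst := List.mem_map_of_mem hq
      have hne : p.1 ≠ q.1 := fun hh => hnk2.1 (by rwa [hh])
      simpa using hne

-- ===== VERDICT (by name: the statement is the Claim_ definition above) =====
theorem resolve_unates_py_spec : Claim_equal_resolve_unates_py := by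
  intro tree target _hdom hpre
  unfold Spec_resolve_unates_py
  obtain ⟨rest, hc⟩ := Option.isSome_iff_exists.mp hpre
  obtain ⟨node, r1, hp, hc0⟩ := consume_parseL target (tree.length + 1) tree 0 rest
    (Nat.lt_succ_self _) (by simpa using hc)
  obtain ⟨hwf, hgo⟩ := goA_eq target (tree.length + 1) tree node r1 hp
  obtain ⟨j, hpb, hdrop⟩ := parseB_of_parseL tree target (tree.length + 1) 0 node r1
    (by simpa using hp)
  have hwalk : walkB node 1 (PySem.Dict.mk []) = unA node := by
    rw [walkB_eq, goAMul_one, mergeL_fresh (unA node).items (PySem.Dict.mk [])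
      (by simpa [PySem.Dict.keys] using nk_unA node)
      (by intro p _; simp [PySem.Dict.contains])]
    simp
  unfold resolve_unates_py resolve_unates_py_alt
  rw [hpb]
  simp [hgo, hdrop, hwalk]
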